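-- pv_equiv track=rewrite | github.com/duartelaia/projeto-ia | main.py | rotation_posibilities
-- ===== SOURCE A (Python) =====
-- OFF = 0
--
-- ON = 1
--
-- def rotation_posibilities(top, bot, right, left):
--     bits = (top, bot, right, left)
--     possibilities = [[OFF, ON, ON, ON], [ON, OFF, ON, ON],
--                      [ON, ON, OFF, ON], [ON, ON, ON, OFF]]
--
--     for i in range(4):
--         if (bits[i] == OFF):
--             # In this case, there is only one possibility,
--             # so create that possibility and return it
--             possibilities = [[ON for i in range(4)]]
--             possibilities[0][i] = OFF
--             break
--
--         elif (bits[i] == ON):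
--             # In this case, we know that a specific possiblity
--             # is impossible, so create that possibility and
--             # remove it from the list
--             comb = [ON for i in range(4)]
--             comb[i] = OFF
--             possibilities.remove(comb)
--
--     return possibilities
-- ===== SOURCE B (Python) =====
-- OFF = 0
--
-- ON = 1
--
-- def _single_off(i):
--     c = [ON, ON, ON, ON]
--     c[i] = OFF
--     return c
--
-- def rotation_posibilities(top, bot, right, left):
--     bits = (top, bot, right, left)
--     # Phase 1: an OFF bit forces the unique possibility at its first index.
--     for i in range(4):
--         if bits[i] == OFF:
--             return [_single_off(i)]
--     # Phase 2: no OFF bit; keep exactly the combos whose index is not ON.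
--     return [_single_off(i) for i in range(4) if bits[i] != ON]
-- ===== Notes on version B (the rewrite author's own statement) =====
-- stated objective: simpler
-- what changed: Replaces A's build-all-four-then-.remove()-inside-one-loop (with an in-loop break rewriting the list) by a two-phase find-then-construct: first scan for the earliest OFF bit and return its single combo, otherwise build the kept combos directly by a filtered comprehension, never materialising or mutating the four-element candidate list.
import Mathlib
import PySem

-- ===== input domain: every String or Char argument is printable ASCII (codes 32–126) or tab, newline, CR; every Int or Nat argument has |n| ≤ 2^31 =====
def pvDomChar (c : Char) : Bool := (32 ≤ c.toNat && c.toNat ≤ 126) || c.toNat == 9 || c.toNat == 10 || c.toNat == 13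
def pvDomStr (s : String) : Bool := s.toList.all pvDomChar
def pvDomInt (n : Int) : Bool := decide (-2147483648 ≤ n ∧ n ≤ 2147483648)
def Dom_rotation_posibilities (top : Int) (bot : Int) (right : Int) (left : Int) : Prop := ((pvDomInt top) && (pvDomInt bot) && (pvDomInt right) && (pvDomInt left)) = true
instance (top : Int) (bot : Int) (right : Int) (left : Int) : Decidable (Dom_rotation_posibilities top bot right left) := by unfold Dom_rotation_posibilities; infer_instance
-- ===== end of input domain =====

-- B replaces A's build-all-then-.remove() loop with a find-first-OFF scan and a direct filtered construction (objective: simpler).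

-- ===== PORT A =====
-- comb = [ON for i in range(4)]; comb[i] = OFF
def pvCombA (i : Nat) : List Int := (List.range 4).map (fun j => if j = i then 0 else 1)

-- the loop 'for i in range(4): …' of A, carrying the mutable 'possibilities'
def pvLoopA (bits : List Int) : Nat → List (List Int) → List (List Int)
  | i, poss =>
    if i < 4 then
      let b := bits.getD i 0
      if b = 0 then
        -- possibilities = [[ON]*4]; possibilities[0][i] = OFF; break
        [pvCombA i]
      else if b = 1 then
        -- possibilities.remove(comb)  (never raises here: comb is present)
        pvLoopA bits (i + 1) ((PySem.List.remove? poss (pvCombA i)).getD poss)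
      else
        pvLoopA bits (i + 1) poss
    else poss

def rotation_posibilities (top : Int) (bot : Int) (right : Int) (left : Int) : List (List Int) :=
  let bits : List Int := [top, bot, right, left]
  pvLoopA bits 0 [[0,1,1,1],[1,0,1,1],[1,1,0,1],[1,1,1,0]]

-- ===== PORT B =====
-- _single_off(i): c = [ON,ON,ON,ON]; c[i] = OFF
def pvSingleOff (i : Nat) : List Int := [0,1,1,1].set 0 1 |>.set i 0

def rotation_posibilities_alt (top : Int) (bot : Int) (right : Int) (left : Int) : List (List Int) :=
  let bits : List Int := [top, bot, right, left]
  match bits.findIdx? (fun b => b == 0) with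
  | some i => [pvSingleOff i]
  | none => ((List.range 4).filter (fun i => bits.getD i 0 != 1)).map pvSingleOff

-- ===== PRECONDITION & SPEC =====
def Spec_rotation_posibilities (top : Int) (bot : Int) (right : Int) (left : Int) (out : List (List Int)) : Prop := out = rotation_posibilities_alt top bot right left
instance (top : Int) (bot : Int) (right : Int) (left : Int) (out : List (List Int)) : Decidable (Spec_rotation_posibilities top bot right left out) := by unfold Spec_rotation_posibilities; infer_instance

-- ===== CLAIM (what is proved, stated in full; the proofs are below) =====
def Claim_equal_rotation_posibilities : Prop := ∀ (top : Int) (bot : Int) (right : Int) (left : Int), Dom_rotation_posibilities top bot right left → Spec_rotation_posibilities top bot right left (rotation_posibilities top bot right left)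

-- ===== LEMMAS AND PROOFS =====

-- ===== VERDICT (by name: the statement is the Claim_ definition above) =====
theorem rotation_posibilities_spec : Claim_equal_rotation_posibilities := by
  intro t b r l _
  unfold Spec_rotation_posibilities rotation_posibilities rotation_posibilities_alt
  by_cases h1 : t = 0 <;> by_cases h2 : t = 1 <;>
  by_cases h3 : b = 0 <;> by_cases h4 : b = 1 <;>
  by_cases h5 : r = 0 <;> by_cases h6 : r = 1 <;>
  by_cases h7 : l = 0 <;> by_cases h8 : l = 1 <;>
  simp_all [pvLoopA, pvCombA, pvSingleOff, List.findIdx?, List.findIdx?.go, PySem.List.remove?,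
      List.range_succ, List.idxOf?, bne_iff_ne]
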